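-- pv_equiv track=rewrite | github.com/Maxalexandre12/wordlist | wordlist.py | combinacoes
-- ===== SOURCE A (Python) =====
-- import itertools
--
-- def combinacoes(palavras_chave):
--     combinations = set()
--     for r in range(2, len(palavras_chave)+1):
--         for combi in itertools.combinations(palavras_chave, r):
--             palavra_combinada = ''.join(combi)
--             if palavra_combinada not in palavras_chave:
--                 combinations.add(palavra_combinada)
--     return combinations
-- ===== SOURCE B (Python) =====
-- def combinacoes(palavras_chave):
--     items = list(palavras_chave)
--
--     def gen(its):
--         # table t with t[r] = the r-element combinations of its, already joined,
--         # in lexicographic index order, for r = 0 .. len(its)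
--         if not its:
--             return [['']]
--         rest = gen(its[1:]) + [[]]
--         head = its[0]
--         return [rest[0]] + [[head + s for s in rest[r - 1]] + rest[r]
--                             for r in range(1, len(its) + 1)]
--
--     table = gen(items)
--     cand = [s for r in range(2, len(items) + 1)
--               for s in table[r]
--               if s not in palavras_chave]
--     return set(cand)
-- ===== Notes on version B (the rewrite author's own statement) =====
-- stated objective: alternative
-- what changed: Replaces the size-stratified itertools.combinations nested loops (join each tuple at the end, mutate a set per element) with a single head/tail recursion that builds a size-indexed table of already-joined combination strings, then collects all candidates in one comprehension and constructs the set once.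
import Mathlib
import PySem

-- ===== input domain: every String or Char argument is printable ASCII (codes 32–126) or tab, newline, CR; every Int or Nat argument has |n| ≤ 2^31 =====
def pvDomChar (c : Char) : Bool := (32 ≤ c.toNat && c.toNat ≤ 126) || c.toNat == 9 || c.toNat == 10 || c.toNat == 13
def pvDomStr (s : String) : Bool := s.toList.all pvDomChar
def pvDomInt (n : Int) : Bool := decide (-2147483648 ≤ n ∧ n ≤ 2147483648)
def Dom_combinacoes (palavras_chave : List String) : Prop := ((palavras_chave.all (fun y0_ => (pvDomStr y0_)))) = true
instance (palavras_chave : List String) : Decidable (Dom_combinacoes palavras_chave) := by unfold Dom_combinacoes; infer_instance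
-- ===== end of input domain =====

-- B replaces the itertools.combinations nested loops (join each tuple at the end, mutate a set) by one
-- recursion that builds a size-indexed table of already-joined combinations and constructs the set once (alternative).


-- ===== PORT A =====
-- hand port of itertools.combinations(xs, r): the r-element combinations of xs as lists,
-- in the lexicographic index order itertools yields them (exact for list inputs)
def pvCombosA (xs : List String) (r : Nat) : List (List String) :=
  match xs, r with
  | _, 0 => [[]]
  | [], _ + 1 => []
  | x :: xs, r + 1 => (pvCombosA xs r).map (fun c => x :: c) ++ pvCombosA xs (r + 1)

def combinacoes (palavras_chave : List String) : List String :=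
  (PySem.List.pyRange 2 ((palavras_chave.length : Int) + 1) 1).foldl
    (fun combinations r =>
      (pvCombosA palavras_chave r.toNat).foldl
        (fun combinations combi =>
          let palavra_combinada := PySem.Str.join "" combi
          if palavras_chave.contains palavra_combinada then combinations
          else PySem.Set.add combinations palavra_combinada)
        combinations)
    PySem.Set.empty

-- ===== PORT B =====
-- gen(its): table t with t[r] = joined r-element combinations of its, for r = 0 .. len(its)
-- (Source B's rest[0], rest[r-1], rest[r] are always in range; pyGetD is their exact total form)
def pvGenB (its : List String) : List (List String) :=
  match its with
  | [] => [[""]]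
  | head :: tail =>
    let rest := pvGenB tail ++ [[]]
    PySem.List.pyGetD rest 0 [] ::
      (PySem.List.pyRange 1 ((tail.length : Int) + 2) 1).map
        (fun r => (PySem.List.pyGetD rest (r - 1) []).map (fun s => head ++ s) ++
                  PySem.List.pyGetD rest r [])

def combinacoes_alt (palavras_chave : List String) : List String :=
  let table := pvGenB palavras_chave
  PySem.Set.ofList
    (((PySem.List.pyRange 2 ((palavras_chave.length : Int) + 1) 1).flatMap
        (fun r => PySem.List.pyGetD table r [])).filter
      (fun s => ! palavras_chave.contains s))

-- ===== PRECONDITION & SPEC =====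
def Spec_combinacoes (palavras_chave : List String) (out : List String) : Prop := out = combinacoes_alt palavras_chave
instance (palavras_chave : List String) (out : List String) : Decidable (Spec_combinacoes palavras_chave out) := by unfold Spec_combinacoes; infer_instance

-- ===== CLAIM (what is proved, stated in full; the proofs are below) =====
def Claim_equal_combinacoes : Prop := ∀ (palavras_chave : List String), Dom_combinacoes palavras_chave → Spec_combinacoes palavras_chave (combinacoes palavras_chave)

-- ===== LEMMAS AND PROOFS =====

-- proof-only helper: the size-r slice of B's table, as a recursion indexed by r
def pvGenR (its : List String) (r : Nat) : List String :=
  match its, r with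
  | _, 0 => [""]
  | [], _ + 1 => []
  | head :: tail, r + 1 => (pvGenR tail r).map (fun s => head ++ s) ++ pvGenR tail (r + 1)

theorem pvGenR_eq_nil_of_gt (its : List String) (r : Nat) (h : its.length < r) :
    pvGenR its r = [] := by
  induction its generalizing r with
  | nil => cases r with
    | zero => omega
    | succ r => rfl
  | cons x xs ih =>
    cases r with
    | zero => omega
    | succ r =>
      simp only [List.length_cons] at h
      simp [pvGenR, ih r (by omega), ih (r+1) (by omega)]

-- B's table is pvGenR at every size
theorem pv_table_eq (its : List String) :
    pvGenB its = (List.range (its.length + 1)).map (pvGenR its) := by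
  induction its with
  | nil => rfl
  | cons head tail ih =>
    have hget : ∀ k : Nat, PySem.List.pyGetD (pvGenB tail ++ [[]]) ((k : Nat) : Int) [] = pvGenR tail k := by
      intro k
      rw [PySem.List.pyGetD_natCast, List.getD_eq_getElem?_getD]
      by_cases h1 : k < tail.length + 1
      · rw [List.getElem?_append_left (by simp [ih]; omega)]
        simp [ih, h1]
      · by_cases h2 : k = tail.length + 1
        · subst h2
          rw [List.getElem?_append_right (by simp [ih])]
          simp [ih, pvGenR_eq_nil_of_gt tail (tail.length + 1) (by omega)]
        · rw [List.getElem?_eq_none (by simp [ih]; omega)]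
          simp [pvGenR_eq_nil_of_gt tail k (by omega)]
    simp only [pvGenB]
    rw [PySem.List.pyRange_one]
    have h20 : ((tail.length : Int) + 2 - 1).toNat = tail.length + 1 := by omega
    rw [h20]
    simp only [List.length_cons, List.map_map]
    conv_rhs => rw [List.range_succ_eq_map]
    simp only [List.map_cons, List.map_map]
    congr 1
    · have h0 := hget 0
      simp only [Nat.cast_zero] at h0
      rw [h0]
      simp [pvGenR]
    · apply List.map_congr_left
      intro k _
      simp only [Function.comp]
      have e1 : (1 : Int) + (k : Nat) - 1 = ((k : Nat) : Int) := by omega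
      have e2 : (1 : Int) + (k : Nat) = ((k + 1 : Nat) : Int) := by push_cast; ring
      rw [e1, e2, hget k, hget (k + 1)]
      simp [pvGenR]

theorem pv_join_cons (x : String) (l : List String) :
    PySem.Str.join "" (x :: l) = x ++ PySem.Str.join "" l := by
  cases l with
  | nil => simp [PySem.Str.join, PySem.Chars.join_nil]
  | cons y l => simp [PySem.Str.join, PySem.Chars.join_cons_cons]

-- the size-r slice is A's combinations, joined
theorem pv_gen_eq_map_join (xs : List String) (r : Nat) :
    pvGenR xs r = (pvCombosA xs r).map (PySem.Str.join "") := by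
  induction xs generalizing r with
  | nil =>
    cases r with
    | zero => simp [pvGenR, pvCombosA, PySem.Str.join, PySem.Chars.join_nil]
    | succ r => simp [pvGenR, pvCombosA]
  | cons x xs ih =>
    cases r with
    | zero => simp [pvGenR, pvCombosA, PySem.Str.join, PySem.Chars.join_nil]
    | succ r =>
      simp only [pvGenR, pvCombosA, List.map_append, List.map_map, ih]
      congr 1
      apply List.map_congr_left
      intro c _
      simp [pv_join_cons]

-- the filtered-add inner loop is a Set.update with the filtered, mapped list
theorem pv_foldl_if_add (pk : List String) (l : List (List String)) (acc : PySem.Set String) :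
    l.foldl
      (fun combinations combi =>
        let palavra_combinada := PySem.Str.join "" combi
        if pk.contains palavra_combinada then combinations
        else PySem.Set.add combinations palavra_combinada)
      acc
    = PySem.Set.update acc
        (((l.map (PySem.Str.join "")).filter (fun s => ! pk.contains s))) := by
  induction l generalizing acc with
  | nil => simp [PySem.Set.update]
  | cons c l ih =>
    cases h : pk.contains (PySem.Str.join "" c) with
    | true =>
      simp only [List.foldl_cons, List.map_cons, List.filter_cons, h, Bool.not_true, if_pos,
        Bool.false_eq_true, if_false]
      exact ih acc
    | false =>
      simp only [List.foldl_cons, List.map_cons, List.filter_cons, h, Bool.not_false,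
        Bool.false_eq_true, if_false, if_true]
      rw [ih, PySem.Set.update_cons]

-- the outer loop over r accumulates a Set.update with the flattened candidate list
theorem pv_outer_loop (pk : List String) (rs : List Int) (acc : PySem.Set String) :
    rs.foldl
      (fun combinations r =>
        (pvCombosA pk r.toNat).foldl
          (fun combinations combi =>
            let palavra_combinada := PySem.Str.join "" combi
            if pk.contains palavra_combinada then combinations
            else PySem.Set.add combinations palavra_combinada)
          combinations)
      acc
    = PySem.Set.update acc
        (rs.flatMap (fun r => (pvGenR pk r.toNat).filter (fun s => ! pk.contains s))) := by
  induction rs generalizing acc with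
  | nil => simp [PySem.Set.update]
  | cons r rs ih =>
    simp only [List.foldl_cons, List.flatMap_cons]
    rw [pv_foldl_if_add, ih, PySem.Set.update_append, pv_gen_eq_map_join]

-- table lookups in B's candidate list are pvGenR
theorem pv_flatMap_table (pk : List String) :
    (PySem.List.pyRange 2 ((pk.length : Int) + 1) 1).flatMap
      (fun r => PySem.List.pyGetD (pvGenB pk) r []) =
    (PySem.List.pyRange 2 ((pk.length : Int) + 1) 1).flatMap
      (fun r => pvGenR pk r.toNat) := by
  apply List.flatMap_congr
  intro r hr
  rw [PySem.List.mem_pyRange_one] at hr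
  have h0 : r = ((r.toNat : Nat) : Int) := by omega
  rw [pv_table_eq, h0, PySem.List.pyGetD_natCast]
  rw [List.getD_eq_getElem?_getD, List.getElem?_map, List.getElem?_range (by omega)]
  rfl

theorem combinacoes_eq (pk : List String) : combinacoes pk = combinacoes_alt pk := by
  unfold combinacoes combinacoes_alt
  dsimp only
  rw [pv_flatMap_table, List.filter_flatMap, pv_outer_loop, ← PySem.Set.update_nil_left]
  rfl

-- ===== VERDICT (by name: the statement is the Claim_ definition above) =====
theorem combinacoes_spec : Claim_equal_combinacoes := by
  intro pk _
  unfold Spec_combinacoes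
  exact combinacoes_eq pk
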